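-- pv_equiv track=rewrite | github.com/kidnixt/sistemas-multiagente | Simultaneous_Games/agents/independent_q_learning.py | simplify_obs
-- ===== SOURCE A (Python) =====
-- def simplify_obs(obs):
--     if obs is None:
--         return (0,) * 6
--
--     obs = list(map(int, obs))
--
--     # Asumimos que cada fruta tiene 3 valores: x, y, nivel
--     num_fruits = (len(obs) - 6) // 3
--
--     self_x, self_y, self_lvl = obs[-6], obs[-5], obs[-4]
--     other_x, other_y, other_lvl = obs[-3], obs[-2], obs[-1]
--
--     def is_adjacent(ax, ay, bx, by):
--         return (abs(ax - bx) == 1 and ay == by) or (abs(ay - by) == 1 and ax == bx)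
--
--     def discretize_level(lvl):
--         return 0 if lvl == 1 else 1 if lvl == 2 else 2
--
--     best_fruit = None
--     min_distance = float('inf')
--
--     for i in range(num_fruits):
--         fx = obs[i * 3]
--         fy = obs[i * 3 + 1]
--         flvl = obs[i * 3 + 2]
--
--         if self_lvl >= flvl:
--             dist = abs(fx - self_x) + abs(fy - self_y)
--             if dist < min_distance:
--                 min_distance = dist
--                 best_fruit = (fx, fy, flvl)
--
--     # Si no hay fruta que pueda recolectar solo, tomamos la más cercana igual
--     if best_fruit is None:
--         for i in range(num_fruits):
--             fx = obs[i * 3]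
--             fy = obs[i * 3 + 1]
--             flvl = obs[i * 3 + 2]
--
--             dist = abs(fx - self_x) + abs(fy - self_y)
--             if dist < min_distance:
--                 min_distance = dist
--                 best_fruit = (fx, fy, flvl)
--
--     fx, fy, food_lvl = best_fruit
--
--     self_adj = int(is_adjacent(self_x, self_y, fx, fy))
--     other_adj = int(is_adjacent(other_x, other_y, fx, fy))
--     can_load_alone = int(self_lvl >= food_lvl)
--
--     return (
--         self_adj,
--         other_adj,
--         discretize_level(food_lvl),
--         discretize_level(self_lvl),
--         discretize_level(other_lvl),
--         can_load_alone,
--     )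
-- ===== SOURCE B (Python) =====
-- def simplify_obs(obs):
--     if obs is None:
--         return (0,) * 6
--
--     vals = [int(v) for v in obs]
--     self_x, self_y, self_lvl = vals[-6], vals[-5], vals[-4]
--     other_x, other_y, other_lvl = vals[-3], vals[-2], vals[-1]
--
--     # One pass over the fruits with two candidates: the nearest collectible
--     # fruit and the nearest fruit overall (strict '<' so the first minimum wins).
--     best_col = None  # (fruit, dist) with self_lvl >= fruit level
--     best_any = None  # (fruit, dist) unconditionally
--     for i in range((len(vals) - 6) // 3):
--         fruit = (vals[3 * i], vals[3 * i + 1], vals[3 * i + 2])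
--         d = abs(fruit[0] - self_x) + abs(fruit[1] - self_y)
--         if best_any is None or d < best_any[1]:
--             best_any = (fruit, d)
--         if self_lvl >= fruit[2] and (best_col is None or d < best_col[1]):
--             best_col = (fruit, d)
--
--     fx, fy, food_lvl = (best_col if best_col is not None else best_any)[0]
--
--     def is_adjacent(ax, ay, bx, by):
--         return (abs(ax - bx) == 1 and ay == by) or (abs(ay - by) == 1 and ax == bx)
--
--     def discretize_level(lvl):
--         return 0 if lvl == 1 else 1 if lvl == 2 else 2
--
--     return (
--         int(is_adjacent(self_x, self_y, fx, fy)),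
--         int(is_adjacent(other_x, other_y, fx, fy)),
--         discretize_level(food_lvl),
--         discretize_level(self_lvl),
--         discretize_level(other_lvl),
--         int(self_lvl >= food_lvl),
--     )
-- ===== Notes on version B (the rewrite author's own statement) =====
-- stated objective: simpler
-- what changed: Replaces A's two sequential scans over the fruit list (collectible-only, then an unconditional fallback scan) by a single pass that maintains two candidates at once (nearest collectible fruit and nearest fruit overall) and picks the collectible one if it exists.
import Mathlib
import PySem

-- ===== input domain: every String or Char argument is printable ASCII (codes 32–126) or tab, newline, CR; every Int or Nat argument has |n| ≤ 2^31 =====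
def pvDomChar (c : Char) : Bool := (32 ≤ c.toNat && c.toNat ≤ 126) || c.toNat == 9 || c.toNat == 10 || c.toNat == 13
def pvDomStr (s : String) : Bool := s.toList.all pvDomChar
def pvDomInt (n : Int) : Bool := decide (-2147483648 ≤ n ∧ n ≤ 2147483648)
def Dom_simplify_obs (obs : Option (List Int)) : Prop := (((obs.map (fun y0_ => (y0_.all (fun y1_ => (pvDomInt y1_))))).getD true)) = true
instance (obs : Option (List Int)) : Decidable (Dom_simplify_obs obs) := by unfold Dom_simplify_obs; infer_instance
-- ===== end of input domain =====

-- B merges A's two sequential scans over the fruit list into one pass keeping two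
-- candidates (nearest collectible fruit, nearest fruit overall); same return value.

-- ===== PORT A =====
-- obs[i] (possibly negative index); default 0 only where Python would raise (outside Pre_)
def sobsGet (l : List Int) (i : Int) : Int := (PySem.List.pyGet? l i).getD 0

def sobsAdj (ax ay bx b_y : Int) : Bool :=
  ((|ax - bx| == 1) && (ay == b_y)) || ((|ay - b_y| == 1) && (ax == bx))

def sobsDisc (lvl : Int) : Int := if lvl = 1 then 0 else if lvl = 2 then 1 else 2

-- first loop of A: only fruits with self_lvl >= flvl; min_distance=none means float('inf')
def sobsStep1 (l : List Int) (sx sy slvl : Int)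
    (st : Option (Int × Int × Int) × Option Int) (i : Int) :
    Option (Int × Int × Int) × Option Int :=
  let fx := sobsGet l (i * 3)
  let fy := sobsGet l (i * 3 + 1)
  let flvl := sobsGet l (i * 3 + 2)
  if slvl ≥ flvl then
    let dist := |fx - sx| + |fy - sy|
    if (match st.2 with | none => true | some m => decide (dist < m)) then
      (some (fx, fy, flvl), some dist)
    else st
  else st

-- second (fallback) loop of A: unconditional
def sobsStep2 (l : List Int) (sx sy : Int)
    (st : Option (Int × Int × Int) × Option Int) (i : Int) :
    Option (Int × Int × Int) × Option Int :=
  let fx := sobsGet l (i * 3)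
  let fy := sobsGet l (i * 3 + 1)
  let flvl := sobsGet l (i * 3 + 2)
  let dist := |fx - sx| + |fy - sy|
  if (match st.2 with | none => true | some m => decide (dist < m)) then
    (some (fx, fy, flvl), some dist)
  else st

def sobsOut (fx fy flvl sx sy slvl ox oy olvl : Int) : Int × Int × Int × Int × Int × Int :=
  ((if sobsAdj sx sy fx fy then 1 else 0),
   (if sobsAdj ox oy fx fy then 1 else 0),
   sobsDisc flvl, sobsDisc slvl, sobsDisc olvl,
   (if slvl ≥ flvl then 1 else 0))

def simplify_obs (obs : Option (List Int)) : Int × Int × Int × Int × Int × Int :=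
  match obs with
  | none => (0, 0, 0, 0, 0, 0)
  | some l =>
    let sx := sobsGet l (-6); let sy := sobsGet l (-5); let slvl := sobsGet l (-4)
    let ox := sobsGet l (-3); let oy := sobsGet l (-2); let olvl := sobsGet l (-1)
    let idxs := PySem.List.pyRange 0 (PySem.Int.floordiv ((l.length : Int) - 6) 3) 1
    let st1 := idxs.foldl (sobsStep1 l sx sy slvl) (none, none)
    let best :=
      match st1.1 with
      | some t => some t
      | none => (idxs.foldl (sobsStep2 l sx sy) st1).1
    match best with
    | none => (0, 0, 0, 0, 0, 0)   -- Python raises here (unpacking None); outside Pre_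
    | some (fx, fy, flvl) => sobsOut fx fy flvl sx sy slvl ox oy olvl

-- ===== PORT B =====
-- update a candidate (fruit, dist): take the new one iff no candidate yet or strictly closer
def sobsUpd (c : Option ((Int × Int × Int) × Int)) (t : Int × Int × Int) (d : Int) :
    Option ((Int × Int × Int) × Int) :=
  match c with
  | none => some (t, d)
  | some (_, d0) => if d < d0 then some (t, d) else c

-- one pass: st.1 = best collectible candidate, st.2 = best candidate overall
def sobsStepB (l : List Int) (sx sy slvl : Int)
    (st : Option ((Int × Int × Int) × Int) × Option ((Int × Int × Int) × Int)) (i : Int) :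
    Option ((Int × Int × Int) × Int) × Option ((Int × Int × Int) × Int) :=
  let t := (sobsGet l (3 * i), sobsGet l (3 * i + 1), sobsGet l (3 * i + 2))
  let d := |t.1 - sx| + |t.2.1 - sy|
  ((if slvl ≥ t.2.2 then sobsUpd st.1 t d else st.1), sobsUpd st.2 t d)

def simplify_obs_alt (obs : Option (List Int)) : Int × Int × Int × Int × Int × Int :=
  match obs with
  | none => (0, 0, 0, 0, 0, 0)
  | some l =>
    let sx := sobsGet l (-6); let sy := sobsGet l (-5); let slvl := sobsGet l (-4)
    let ox := sobsGet l (-3); let oy := sobsGet l (-2); let olvl := sobsGet l (-1)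
    let idxs := PySem.List.pyRange 0 (PySem.Int.floordiv ((l.length : Int) - 6) 3) 1
    let st := idxs.foldl (sobsStepB l sx sy slvl) (none, none)
    match (match st.1 with | some c => some c | none => st.2) with
    | none => (0, 0, 0, 0, 0, 0)   -- Python raises here (unpacking None); outside Pre_
    | some ((fx, fy, flvl), _) => sobsOut fx fy flvl sx sy slvl ox oy olvl

-- ===== PRECONDITION & SPEC =====
-- Pre_ excludes exactly the inputs where Python A raises: a list shorter than 6 raises
-- IndexError, and a list of length 6..8 has no fruit so unpacking best_fruit=None raises
-- TypeError. (B raises the same way there.)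
def Pre_simplify_obs (obs : Option (List Int)) : Prop :=
  (match obs with
   | none => true
   | some l => decide (9 ≤ l.length)) = true
instance (obs : Option (List Int)) : Decidable (Pre_simplify_obs obs) := by
  unfold Pre_simplify_obs; infer_instance

def pvWitness_simplify_obs : Option (List Int) := some [2, 3, 1, 0, 0, 2, 5, 5, 1]

def Spec_simplify_obs (obs : Option (List Int)) (out : Int × Int × Int × Int × Int × Int) : Prop := out = simplify_obs_alt obs
instance (obs : Option (List Int)) (out : Int × Int × Int × Int × Int × Int) : Decidable (Spec_simplify_obs obs out) := by unfold Spec_simplify_obs; infer_instance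

-- ===== CLAIM (what is proved, stated in full; the proofs are below) =====
def Claim_equal_simplify_obs : Prop := ∀ (obs : Option (List Int)), Dom_simplify_obs obs → Pre_simplify_obs obs → Spec_simplify_obs obs (simplify_obs obs)

-- ===== LEMMAS AND PROOFS =====

-- view a (fruit, dist) candidate as A's pair of variables (best_fruit, min_distance)
def sobsConv (c : Option ((Int × Int × Int) × Int)) : Option (Int × Int × Int) × Option Int :=
  (c.map Prod.fst, c.map Prod.snd)

-- the two components of B's fold, separated
def sobsStepCol (l : List Int) (sx sy slvl : Int)
    (c : Option ((Int × Int × Int) × Int)) (i : Int) : Option ((Int × Int × Int) × Int) :=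
  let t := (sobsGet l (3 * i), sobsGet l (3 * i + 1), sobsGet l (3 * i + 2))
  let d := |t.1 - sx| + |t.2.1 - sy|
  if slvl ≥ t.2.2 then sobsUpd c t d else c

def sobsStepAny (l : List Int) (sx sy : Int)
    (c : Option ((Int × Int × Int) × Int)) (i : Int) : Option ((Int × Int × Int) × Int) :=
  let t := (sobsGet l (3 * i), sobsGet l (3 * i + 1), sobsGet l (3 * i + 2))
  let d := |t.1 - sx| + |t.2.1 - sy|
  sobsUpd c t d

lemma sobsStepB_split (l : List Int) (sx sy slvl : Int) (idxs : List Int)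
    (c1 c2 : Option ((Int × Int × Int) × Int)) :
    idxs.foldl (sobsStepB l sx sy slvl) (c1, c2) =
      (idxs.foldl (sobsStepCol l sx sy slvl) c1, idxs.foldl (sobsStepAny l sx sy) c2) := by
  induction idxs generalizing c1 c2 with
  | nil => rfl
  | cons i is ih =>
    simp only [List.foldl_cons]
    rw [ih]
    rfl

lemma sobsStep1_conv (l : List Int) (sx sy slvl : Int) (idxs : List Int)
    (c : Option ((Int × Int × Int) × Int)) :
    idxs.foldl (sobsStep1 l sx sy slvl) (sobsConv c) =
      sobsConv (idxs.foldl (sobsStepCol l sx sy slvl) c) := by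
  induction idxs generalizing c with
  | nil => rfl
  | cons i is ih =>
    simp only [List.foldl_cons]
    rw [← ih]
    congr 1
    simp only [sobsStep1, sobsStepCol, sobsUpd, sobsConv, mul_comm i 3]
    rcases c with _ | ⟨t, d0⟩
    · simp only [Option.map_none]
      split <;> simp
    · simp only [Option.map_some, decide_eq_true_eq]
      split
      · split_ifs with h <;> simp
      · rfl

lemma sobsStep2_conv (l : List Int) (sx sy : Int) (idxs : List Int)
    (c : Option ((Int × Int × Int) × Int)) :
    idxs.foldl (sobsStep2 l sx sy) (sobsConv c) =
      sobsConv (idxs.foldl (sobsStepAny l sx sy) c) := by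
  induction idxs generalizing c with
  | nil => rfl
  | cons i is ih =>
    simp only [List.foldl_cons]
    rw [← ih]
    congr 1
    simp only [sobsStep2, sobsStepAny, sobsUpd, sobsConv, mul_comm i 3]
    rcases c with _ | ⟨t, d0⟩
    · simp
    · simp only [Option.map_some, decide_eq_true_eq]
      split_ifs with h <;> simp

-- ===== VERDICT (by name: the statement is the Claim_ definition above) =====
theorem simplify_obs_spec : Claim_equal_simplify_obs := by
  intro obs _ _
  unfold Spec_simplify_obs
  rcases obs with _ | l
  · rfl
  · simp only [simplify_obs, simplify_obs_alt]
    rw [sobsStepB_split]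
    have h1 := sobsStep1_conv l (sobsGet l (-6)) (sobsGet l (-5)) (sobsGet l (-4))
      (PySem.List.pyRange 0 (PySem.Int.floordiv ((l.length : Int) - 6) 3) 1) none
    rw [show (sobsConv none = ((none : Option (Int × Int × Int)), (none : Option Int))) from rfl] at h1
    rw [h1]
    rcases hc : (PySem.List.pyRange 0 (PySem.Int.floordiv ((l.length : Int) - 6) 3) 1).foldl
        (sobsStepCol l (sobsGet l (-6)) (sobsGet l (-5)) (sobsGet l (-4))) none with _ | ⟨⟨fx, fy, flvl⟩, d⟩
    · simp only [sobsConv, Option.map_none]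
      have h2 := sobsStep2_conv l (sobsGet l (-6)) (sobsGet l (-5))
        (PySem.List.pyRange 0 (PySem.Int.floordiv ((l.length : Int) - 6) 3) 1) none
      rw [show (sobsConv none = ((none : Option (Int × Int × Int)), (none : Option Int))) from rfl] at h2
      rw [h2]
      simp only [sobsConv]
      rcases (PySem.List.pyRange 0 (PySem.Int.floordiv ((l.length : Int) - 6) 3) 1).foldl
          (sobsStepAny l (sobsGet l (-6)) (sobsGet l (-5))) none with _ | ⟨⟨fx, fy, flvl⟩, d⟩ <;> rfl
    · rfl
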